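-- pv_equiv track=rewrite | github.com/YangliuDebugger/LeetCode-Solutions | 滑动窗口(sliding window)/2516. Take K of Each Character From Left and Right.py | takeCharacters
-- ===== SOURCE A (Python) =====
-- def takeCharacters(s: str, k: int) -> int:
--
--     cnt = {'a': 0, 'b': 0, 'c': 0}
--     for idx, c in enumerate(s):
--         cnt[c] += 1
--     if cnt['a'] < k or cnt['b'] < k or cnt['c'] < k:
--         return -1
--
--     # sliding window
--     res = len(s)
--     start_idx = 0
--     end_idx = start_idx
--     while start_idx < len(s):
--         while end_idx < len(s):
--             if cnt[s[end_idx]] > k: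
--                 cnt[s[end_idx]] -= 1
--                 end_idx += 1
--             else:
--                 break
--         res = min(res, len(s) - end_idx + start_idx)
--         # this can tackle when start_idx == end_idx
--         cnt[s[start_idx]] += 1
--         start_idx += 1
--     return res
-- ===== SOURCE B (Python) =====
-- def takeCharacters(s: str, k: int) -> int:
--     cnt = {'a': 0, 'b': 0, 'c': 0}
--     for c in s:
--         cnt[c] += 1
--     if cnt['a'] < k or cnt['b'] < k or cnt['c'] < k:
--         return -1
--
--     n = len(s)
--
--     # For a prefix of length l, the smallest total l + r such that taking the
--     # first l and the last r characters yields at least k of each letter.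
--     def need(l):
--         take = {'a': 0, 'b': 0, 'c': 0}
--         for c in s[:l]:
--             take[c] += 1
--         r = 0
--         for c in reversed(s[l:]):
--             if take['a'] >= k and take['b'] >= k and take['c'] >= k:
--                 break
--             take[c] += 1
--             r += 1
--         return l + r
--
--     return min(need(l) for l in range(n + 1))
-- ===== Notes on version B (the rewrite author's own statement) =====
-- stated objective: alternative
-- what changed: Replaces A's in-place sliding window over the discarded middle (two pointers sharing one mutated counter) by a direct take-from-both-ends formulation: for each prefix length l it independently computes the minimal suffix that completes k of each letter and returns the minimum of l + suffix over all l.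
import Mathlib
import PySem

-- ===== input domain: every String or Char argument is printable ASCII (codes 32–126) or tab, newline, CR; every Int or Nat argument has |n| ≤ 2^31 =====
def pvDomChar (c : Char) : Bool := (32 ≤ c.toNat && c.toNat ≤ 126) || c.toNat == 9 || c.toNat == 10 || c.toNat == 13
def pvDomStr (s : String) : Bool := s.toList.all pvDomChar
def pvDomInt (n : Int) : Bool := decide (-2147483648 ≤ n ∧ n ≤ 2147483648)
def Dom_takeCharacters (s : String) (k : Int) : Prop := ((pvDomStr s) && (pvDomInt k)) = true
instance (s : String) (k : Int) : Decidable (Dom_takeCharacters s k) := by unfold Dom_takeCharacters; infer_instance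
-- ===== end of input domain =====

-- B replaces A's shared-counter sliding window by an independent minimal-suffix search per prefix length (alternative decomposition, not faster).

-- ===== PORT A =====
-- {'a': 0, 'b': 0, 'c': 0}
def pvDict0 : PySem.Dict Char Int :=
  ((PySem.Dict.empty.insert 'a' 0).insert 'b' 0).insert 'c' 0

-- the counting loop "for idx, c in enumerate(s): cnt[c] += 1" (under Pre_ every key is present, so modify is exact)
def pvCount (xs : List Char) : PySem.Dict Char Int :=
  xs.foldl (fun d c => d.modify c 0 (· + 1)) pvDict0

-- inner while loop of A
def pvAInner (xs : List Char) (k : Int) (cnt : PySem.Dict Char Int) (e : Nat) :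
    PySem.Dict Char Int × Nat :=
  if h : e < xs.length then
    if cnt.getD xs[e] 0 > k then
      pvAInner xs k (cnt.modify xs[e] 0 (· - 1)) (e + 1)
    else (cnt, e)
  else (cnt, e)
termination_by xs.length - e

-- outer while loop of A
def pvAOuter (xs : List Char) (k : Int) (cnt : PySem.Dict Char Int) (st e : Nat) (res : Int) : Int :=
  if h : st < xs.length then
    let p := pvAInner xs k cnt e
    pvAOuter xs k (p.1.modify xs[st] 0 (· + 1)) (st + 1) p.2
      (min res ((xs.length : Int) - (p.2 : Int) + (st : Int)))
  else res
termination_by xs.length - st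

def takeCharacters (s : String) (k : Int) : Int :=
  let xs := s.toList
  let cnt := pvCount xs
  if cnt.getD 'a' 0 < k ∨ cnt.getD 'b' 0 < k ∨ cnt.getD 'c' 0 < k then -1
  else pvAOuter xs k cnt 0 0 (xs.length : Int)

-- ===== PORT B =====
-- the "for c in reversed(s[l:]): if all taken: break; take[c] += 1; r += 1" loop of B
def pvBGo (k : Int) (take : PySem.Dict Char Int) (r : Int) : List Char → Int
  | [] => r
  | c :: rest =>
    if k ≤ take.getD 'a' 0 ∧ k ≤ take.getD 'b' 0 ∧ k ≤ take.getD 'c' 0 then r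
    else pvBGo k (take.modify c 0 (· + 1)) (r + 1) rest

-- B's helper need(l); s[:l] with 0 ≤ l ≤ len(s) is exactly List.take l, reversed(s[l:]) is (drop l).reverse
def pvNeed (xs : List Char) (k : Int) (l : Nat) : Int :=
  let take := (xs.take l).foldl (fun d c => d.modify c 0 (· + 1)) pvDict0
  (l : Int) + pvBGo k take 0 (xs.drop l).reverse

def takeCharacters_alt (s : String) (k : Int) : Int :=
  let xs := s.toList
  let cnt := pvCount xs
  if cnt.getD 'a' 0 < k ∨ cnt.getD 'b' 0 < k ∨ cnt.getD 'c' 0 < k then -1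
  else
    -- min(need(l) for l in range(n + 1)); the range is nonempty, so min never raises
    match PySem.List.min? ((List.range (xs.length + 1)).map (pvNeed xs k)) (fun v => v) with
    | some v => v
    | none => 0

-- ===== PRECONDITION & SPEC =====
-- Pre_ excludes exactly the strings containing a character other than 'a','b','c': on those the
-- Python A raises KeyError in its first counting loop (and B raises identically).
def Pre_takeCharacters (s : String) (k : Int) : Prop :=
  (s.toList.all (fun c => c == 'a' || c == 'b' || c == 'c')) = true
instance (s : String) (k : Int) : Decidable (Pre_takeCharacters s k) := by
  unfold Pre_takeCharacters; infer_instance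
def pvWitness_takeCharacters : String × Int := ("abacbc", 1)

def Spec_takeCharacters (s : String) (k : Int) (out : Int) : Prop := out = takeCharacters_alt s k
instance (s : String) (k : Int) (out : Int) : Decidable (Spec_takeCharacters s k out) := by
  unfold Spec_takeCharacters; infer_instance

-- ===== CLAIM (what is proved, stated in full; the proofs are below) =====
def Claim_equal_takeCharacters : Prop := ∀ (s : String) (k : Int), Dom_takeCharacters s k → Pre_takeCharacters s k → Spec_takeCharacters s k (takeCharacters s k)

-- ===== LEMMAS AND PROOFS =====

-- count (as Int) of c in the prefix of length l / the suffix from position e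
def pvPre (xs : List Char) (l : Nat) (c : Char) : Int := ((xs.take l).count c : Int)
def pvSuf (xs : List Char) (e : Nat) (c : Char) : Int := ((xs.drop e).count c : Int)

-- "taking the first l and the chars from position e on yields at least k of each letter"
abbrev pvValid (xs : List Char) (k : Int) (l e : Nat) : Prop :=
  k ≤ pvPre xs l 'a' + pvSuf xs e 'a' ∧
  k ≤ pvPre xs l 'b' + pvSuf xs e 'b' ∧
  k ≤ pvPre xs l 'c' + pvSuf xs e 'c'

-- the largest window end e ≤ n that is still valid for prefix l
def pvMaxE (xs : List Char) (k : Int) (l : Nat) : Nat :=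
  Nat.findGreatest (fun e => pvValid xs k l e) xs.length

-- the cost contributed by prefix length l
def pvG (xs : List Char) (k : Int) (l : Nat) : Int :=
  (l : Int) + ((xs.length - pvMaxE xs k l : Nat) : Int)

-- the three counter values a dict state holds
def pvCntIs (d : PySem.Dict Char Int) (a b c : Int) : Prop :=
  d.getD 'a' 0 = a ∧ d.getD 'b' 0 = b ∧ d.getD 'c' 0 = c


-- ---- arithmetic facts about prefix/suffix counts ----

theorem pv_suf_succ (xs : List Char) (e : Nat) (h : e < xs.length) (c : Char) :
    pvSuf xs e c = pvSuf xs (e+1) c + (if xs[e] = c then 1 else 0) := by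
  unfold pvSuf
  rw [List.drop_eq_getElem_cons h, List.count_cons]
  by_cases hc : xs[e] = c <;> simp [hc]

theorem pv_pre_succ (xs : List Char) (l : Nat) (h : l < xs.length) (c : Char) :
    pvPre xs (l+1) c = pvPre xs l c + (if xs[l] = c then 1 else 0) := by
  unfold pvPre
  rw [List.take_succ_eq_append_getElem h, List.count_append]
  by_cases hc : xs[l] = c <;> simp [hc]

theorem pv_pre_add_suf (xs : List Char) (e : Nat) (c : Char) :
    pvPre xs e c + pvSuf xs e c = (xs.count c : Int) := by
  unfold pvPre pvSuf
  rw [← Nat.cast_add, ← List.count_append, List.take_append_drop]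

theorem pv_pre_nonneg (xs : List Char) (l : Nat) (c : Char) : 0 ≤ pvPre xs l c := by
  unfold pvPre; positivity

theorem pv_suf_anti (xs : List Char) {e e' : Nat} (h : e ≤ e') (c : Char) :
    pvSuf xs e' c ≤ pvSuf xs e c := by
  unfold pvSuf
  have hd : xs.drop e' = (xs.drop e).drop (e' - e) := by
    rw [List.drop_drop]; congr 1; omega
  have hs : List.Sublist (xs.drop e') (xs.drop e) := by
    rw [hd]; exact List.drop_sublist _ _
  exact_mod_cast hs.count_le c

theorem pv_pre_mono (xs : List Char) {l l' : Nat} (h : l ≤ l') (c : Char) :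
    pvPre xs l c ≤ pvPre xs l' c := by
  unfold pvPre
  have he : xs.take l = (xs.take l').take l := by
    rw [List.take_take]; congr 1; omega
  have hs : List.Sublist (xs.take l) (xs.take l') := by
    rw [he]; exact List.take_sublist _ _
  exact_mod_cast hs.count_le c

theorem pv_valid_antitone (xs : List Char) (k : Int) (l : Nat) {e e' : Nat} (h : e ≤ e')
    (hv : pvValid xs k l e') : pvValid xs k l e := by
  obtain ⟨h1, h2, h3⟩ := hv
  have a := pv_suf_anti xs h 'a'; have b := pv_suf_anti xs h 'b'; have c := pv_suf_anti xs h 'c'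
  exact ⟨by linarith, by linarith, by linarith⟩

theorem pv_valid_mono_l (xs : List Char) (k : Int) {l l' : Nat} (e : Nat) (h : l ≤ l')
    (hv : pvValid xs k l e) : pvValid xs k l' e := by
  obtain ⟨h1, h2, h3⟩ := hv
  have a := pv_pre_mono xs h 'a'; have b := pv_pre_mono xs h 'b'; have c := pv_pre_mono xs h 'c'
  exact ⟨by linarith, by linarith, by linarith⟩

theorem pv_valid_self (xs : List Char) (k : Int)
    (ht : k ≤ (xs.count 'a' : Int) ∧ k ≤ (xs.count 'b' : Int) ∧ k ≤ (xs.count 'c' : Int))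
    (l : Nat) : pvValid xs k l l := by
  refine ⟨?_, ?_, ?_⟩ <;> rw [pv_pre_add_suf]
  exacts [ht.1, ht.2.1, ht.2.2]

theorem pv_valid_e0 (xs : List Char) (k : Int)
    (ht : k ≤ (xs.count 'a' : Int) ∧ k ≤ (xs.count 'b' : Int) ∧ k ≤ (xs.count 'c' : Int))
    (l : Nat) : pvValid xs k l 0 := by
  have za := pv_pre_add_suf xs 0 'a'; have zb := pv_pre_add_suf xs 0 'b'
  have zc := pv_pre_add_suf xs 0 'c'
  have na := pv_pre_nonneg xs l 'a'; have nb := pv_pre_nonneg xs l 'b'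
  have nc := pv_pre_nonneg xs l 'c'
  have pa := pv_pre_mono xs (Nat.zero_le l) 'a'
  have pb := pv_pre_mono xs (Nat.zero_le l) 'b'
  have pc := pv_pre_mono xs (Nat.zero_le l) 'c'
  exact ⟨by linarith [ht.1], by linarith [ht.2.1], by linarith [ht.2.2]⟩

-- ---- facts about pvMaxE ----

theorem pv_maxE_le (xs : List Char) (k : Int) (l : Nat) : pvMaxE xs k l ≤ xs.length :=
  Nat.findGreatest_le _

theorem pv_le_maxE (xs : List Char) (k : Int) (l : Nat) {e : Nat} (he : e ≤ xs.length)
    (hv : pvValid xs k l e) : e ≤ pvMaxE xs k l :=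
  Nat.le_findGreatest he hv

theorem pv_valid_maxE (xs : List Char) (k : Int)
    (ht : k ≤ (xs.count 'a' : Int) ∧ k ≤ (xs.count 'b' : Int) ∧ k ≤ (xs.count 'c' : Int))
    (l : Nat) : pvValid xs k l (pvMaxE xs k l) := by
  unfold pvMaxE
  exact Nat.findGreatest_spec (Nat.zero_le _) (pv_valid_e0 xs k ht l)

theorem pv_maxE_eq (xs : List Char) (k : Int) (l : Nat)
    (ht : k ≤ (xs.count 'a' : Int) ∧ k ≤ (xs.count 'b' : Int) ∧ k ≤ (xs.count 'c' : Int))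
    {e : Nat} (hv : pvValid xs k l e) (he : e ≤ xs.length)
    (hstop : e = xs.length ∨ ¬ pvValid xs k l (e+1)) : pvMaxE xs k l = e := by
  refine le_antisymm ?_ (pv_le_maxE xs k l he hv)
  by_contra hlt
  push_neg at hlt
  have hvm := pv_valid_maxE xs k ht l
  have hstep : pvValid xs k l (e+1) := pv_valid_antitone xs k l (by omega) hvm
  rcases hstop with rfl | hn
  · have := pv_maxE_le xs k l; omega
  · exact hn hstep

theorem pv_maxE_lt (xs : List Char) (k : Int) (l : Nat)
    (ht : k ≤ (xs.count 'a' : Int) ∧ k ≤ (xs.count 'b' : Int) ∧ k ≤ (xs.count 'c' : Int))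
    {e : Nat} (hnv : ¬ pvValid xs k l e) : pvMaxE xs k l < e := by
  by_contra h
  push_neg at h
  exact hnv (pv_valid_antitone xs k l h (pv_valid_maxE xs k ht l))

theorem pv_valid_succ_iff (xs : List Char) (k : Int) (l : Nat) {e : Nat} (h : e < xs.length)
    (hx : xs[e] = 'a' ∨ xs[e] = 'b' ∨ xs[e] = 'c') :
    pvValid xs k l (e+1) ↔ (pvValid xs k l e ∧ k < pvPre xs l xs[e] + pvSuf xs e xs[e]) := by
  have sa := pv_suf_succ xs e h 'a'
  have sb := pv_suf_succ xs e h 'b'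
  have sc := pv_suf_succ xs e h 'c'
  unfold pvValid
  rcases hx with hx | hx | hx <;> rw [hx] at sa sb sc ⊢ <;> simp at sa sb sc <;> omega

-- ---- dict-counter bookkeeping ----

theorem pv_cntIs_d0 : pvCntIs pvDict0 0 0 0 := by refine ⟨?_, ?_, ?_⟩ <;> decide

theorem pv_modify_a (d : PySem.Dict Char Int) (a b c : Int) (hd : pvCntIs d a b c) (f : Int → Int) :
    pvCntIs (d.modify 'a' 0 f) (f a) b c :=
  ⟨by rw [PySem.Dict.getD_modify_self, hd.1],
   by rw [PySem.Dict.getD_modify_of_ne d 0 f (by decide), hd.2.1],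
   by rw [PySem.Dict.getD_modify_of_ne d 0 f (by decide), hd.2.2]⟩

theorem pv_modify_b (d : PySem.Dict Char Int) (a b c : Int) (hd : pvCntIs d a b c) (f : Int → Int) :
    pvCntIs (d.modify 'b' 0 f) a (f b) c :=
  ⟨by rw [PySem.Dict.getD_modify_of_ne d 0 f (by decide), hd.1],
   by rw [PySem.Dict.getD_modify_self, hd.2.1],
   by rw [PySem.Dict.getD_modify_of_ne d 0 f (by decide), hd.2.2]⟩

theorem pv_modify_c (d : PySem.Dict Char Int) (a b c : Int) (hd : pvCntIs d a b c) (f : Int → Int) :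
    pvCntIs (d.modify 'c' 0 f) a b (f c) :=
  ⟨by rw [PySem.Dict.getD_modify_of_ne d 0 f (by decide), hd.1],
   by rw [PySem.Dict.getD_modify_of_ne d 0 f (by decide), hd.2.1],
   by rw [PySem.Dict.getD_modify_self, hd.2.2]⟩

theorem pv_count_fold (ys : List Char) :
    ∀ (d : PySem.Dict Char Int) (a b c : Int),
      (∀ x ∈ ys, x = 'a' ∨ x = 'b' ∨ x = 'c') → pvCntIs d a b c →
      pvCntIs (ys.foldl (fun d c => d.modify c 0 (· + 1)) d)
        (a + (ys.count 'a' : Int)) (b + (ys.count 'b' : Int)) (c + (ys.count 'c' : Int)) := by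
  induction ys with
  | nil => intro d a b c _ hd; simpa using hd
  | cons x t ih =>
    intro d a b c hmem hd
    rcases hmem x List.mem_cons_self with hx | hx | hx <;> subst hx <;>
      rw [List.foldl_cons]
    · have := ih (d.modify 'a' 0 (· + 1)) (a+1) b c (fun y hy => hmem y (List.mem_cons_of_mem _ hy))
        (pv_modify_a d a b c hd (· + 1))
      simpa [List.count_cons, add_comm, add_left_comm, add_assoc] using this
    · have := ih (d.modify 'b' 0 (· + 1)) a (b+1) c (fun y hy => hmem y (List.mem_cons_of_mem _ hy))
        (pv_modify_b d a b c hd (· + 1))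
      simpa [List.count_cons, add_comm, add_left_comm, add_assoc] using this
    · have := ih (d.modify 'c' 0 (· + 1)) a b (c+1) (fun y hy => hmem y (List.mem_cons_of_mem _ hy))
        (pv_modify_c d a b c hd (· + 1))
      simpa [List.count_cons, add_comm, add_left_comm, add_assoc] using this

-- ---- counter updates along the three loops ----

theorem pv_cnt_dec_suf (xs : List Char) (st e : Nat) (hlt : e < xs.length)
    (hxe : xs[e] = 'a' ∨ xs[e] = 'b' ∨ xs[e] = 'c') (cnt : PySem.Dict Char Int)
    (hcnt : pvCntIs cnt (pvPre xs st 'a' + pvSuf xs e 'a') (pvPre xs st 'b' + pvSuf xs e 'b')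
      (pvPre xs st 'c' + pvSuf xs e 'c')) :
    pvCntIs (cnt.modify xs[e] 0 (· - 1))
      (pvPre xs st 'a' + pvSuf xs (e+1) 'a') (pvPre xs st 'b' + pvSuf xs (e+1) 'b')
      (pvPre xs st 'c' + pvSuf xs (e+1) 'c') := by
  have sa := pv_suf_succ xs e hlt 'a'
  have sb := pv_suf_succ xs e hlt 'b'
  have sc := pv_suf_succ xs e hlt 'c'
  rcases hxe with hx | hx | hx <;> rw [hx] at sa sb sc ⊢ <;> simp at sa sb sc
  · obtain ⟨G1, G2, G3⟩ := pv_modify_a cnt _ _ _ hcnt (· - 1)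
    exact ⟨by omega, by omega, by omega⟩
  · obtain ⟨G1, G2, G3⟩ := pv_modify_b cnt _ _ _ hcnt (· - 1)
    exact ⟨by omega, by omega, by omega⟩
  · obtain ⟨G1, G2, G3⟩ := pv_modify_c cnt _ _ _ hcnt (· - 1)
    exact ⟨by omega, by omega, by omega⟩

theorem pv_cnt_inc_pre (xs : List Char) (st : Nat) (hlt : st < xs.length)
    (hxe : xs[st] = 'a' ∨ xs[st] = 'b' ∨ xs[st] = 'c') (cnt : PySem.Dict Char Int) (e : Nat)
    (hcnt : pvCntIs cnt (pvPre xs st 'a' + pvSuf xs e 'a') (pvPre xs st 'b' + pvSuf xs e 'b')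
      (pvPre xs st 'c' + pvSuf xs e 'c')) :
    pvCntIs (cnt.modify xs[st] 0 (· + 1))
      (pvPre xs (st+1) 'a' + pvSuf xs e 'a') (pvPre xs (st+1) 'b' + pvSuf xs e 'b')
      (pvPre xs (st+1) 'c' + pvSuf xs e 'c') := by
  have sa := pv_pre_succ xs st hlt 'a'
  have sb := pv_pre_succ xs st hlt 'b'
  have sc := pv_pre_succ xs st hlt 'c'
  rcases hxe with hx | hx | hx <;> rw [hx] at sa sb sc ⊢ <;> simp at sa sb sc
  · obtain ⟨G1, G2, G3⟩ := pv_modify_a cnt _ _ _ hcnt (· + 1)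
    exact ⟨by omega, by omega, by omega⟩
  · obtain ⟨G1, G2, G3⟩ := pv_modify_b cnt _ _ _ hcnt (· + 1)
    exact ⟨by omega, by omega, by omega⟩
  · obtain ⟨G1, G2, G3⟩ := pv_modify_c cnt _ _ _ hcnt (· + 1)
    exact ⟨by omega, by omega, by omega⟩

theorem pv_cnt_inc_suf (xs : List Char) (l e : Nat) (he1 : e - 1 < xs.length) (hpos : 1 ≤ e)
    (hxe : xs[e-1] = 'a' ∨ xs[e-1] = 'b' ∨ xs[e-1] = 'c') (tk : PySem.Dict Char Int)
    (hcnt : pvCntIs tk (pvPre xs l 'a' + pvSuf xs e 'a') (pvPre xs l 'b' + pvSuf xs e 'b')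
      (pvPre xs l 'c' + pvSuf xs e 'c')) :
    pvCntIs (tk.modify xs[e-1] 0 (· + 1))
      (pvPre xs l 'a' + pvSuf xs (e-1) 'a') (pvPre xs l 'b' + pvSuf xs (e-1) 'b')
      (pvPre xs l 'c' + pvSuf xs (e-1) 'c') := by
  have sa := pv_suf_succ xs (e-1) he1 'a'
  have sb := pv_suf_succ xs (e-1) he1 'b'
  have sc := pv_suf_succ xs (e-1) he1 'c'
  rw [Nat.sub_add_cancel hpos] at sa sb sc
  rcases hxe with hx | hx | hx <;> rw [hx] at sa sb sc ⊢ <;> simp at sa sb sc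
  · obtain ⟨G1, G2, G3⟩ := pv_modify_a tk _ _ _ hcnt (· + 1)
    exact ⟨by omega, by omega, by omega⟩
  · obtain ⟨G1, G2, G3⟩ := pv_modify_b tk _ _ _ hcnt (· + 1)
    exact ⟨by omega, by omega, by omega⟩
  · obtain ⟨G1, G2, G3⟩ := pv_modify_c tk _ _ _ hcnt (· + 1)
    exact ⟨by omega, by omega, by omega⟩

-- ---- A's inner while loop reaches exactly pvMaxE ----

theorem pv_inner_spec (xs : List Char) (k : Int) (st : Nat)
    (ht : k ≤ (xs.count 'a' : Int) ∧ k ≤ (xs.count 'b' : Int) ∧ k ≤ (xs.count 'c' : Int))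
    (habc : ∀ x ∈ xs, x = 'a' ∨ x = 'b' ∨ x = 'c') :
    ∀ (m e : Nat) (cnt : PySem.Dict Char Int), xs.length - e = m → e ≤ xs.length →
      pvValid xs k st e →
      pvCntIs cnt (pvPre xs st 'a' + pvSuf xs e 'a') (pvPre xs st 'b' + pvSuf xs e 'b')
        (pvPre xs st 'c' + pvSuf xs e 'c') →
      (pvAInner xs k cnt e).2 = pvMaxE xs k st ∧
      pvCntIs (pvAInner xs k cnt e).1
        (pvPre xs st 'a' + pvSuf xs (pvMaxE xs k st) 'a')
        (pvPre xs st 'b' + pvSuf xs (pvMaxE xs k st) 'b')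
        (pvPre xs st 'c' + pvSuf xs (pvMaxE xs k st) 'c') := by
  intro m
  induction m with
  | zero =>
    intro e cnt hm he hv hcnt
    have hen : e = xs.length := by omega
    rw [pvAInner, dif_neg (by omega)]
    have hmax : pvMaxE xs k st = e := pv_maxE_eq xs k st ht hv he (Or.inl hen)
    rw [hmax]
    exact ⟨rfl, hcnt⟩
  | succ m ih =>
    intro e cnt hm he hv hcnt
    have hlt : e < xs.length := by omega
    rw [pvAInner, dif_pos hlt]
    have hxe : xs[e] = 'a' ∨ xs[e] = 'b' ∨ xs[e] = 'c' := habc _ (List.getElem_mem hlt)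
    have hget : cnt.getD xs[e] 0 = pvPre xs st xs[e] + pvSuf xs e xs[e] := by
      rcases hxe with hx | hx | hx <;> rw [hx] <;>
        first | exact hcnt.1 | exact hcnt.2.1 | exact hcnt.2.2
    by_cases hcond : cnt.getD xs[e] 0 > k
    · rw [if_pos hcond]
      have hv1 : pvValid xs k st (e+1) :=
        (pv_valid_succ_iff xs k st hlt hxe).mpr ⟨hv, by omega⟩
      exact ih (e+1) (cnt.modify xs[e] 0 (· - 1)) (by omega) (by omega) hv1
        (pv_cnt_dec_suf xs st e hlt hxe cnt hcnt)
    · rw [if_neg hcond]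
      have hnv : ¬ pvValid xs k st (e+1) := by
        intro hv1
        have := (pv_valid_succ_iff xs k st hlt hxe).mp hv1
        omega
      have hmax : pvMaxE xs k st = e := pv_maxE_eq xs k st ht hv he (Or.inr hnv)
      rw [hmax]
      exact ⟨rfl, hcnt⟩

-- ---- A's outer loop folds min over the per-prefix costs ----

theorem pv_outer_spec (xs : List Char) (k : Int)
    (ht : k ≤ (xs.count 'a' : Int) ∧ k ≤ (xs.count 'b' : Int) ∧ k ≤ (xs.count 'c' : Int))
    (habc : ∀ x ∈ xs, x = 'a' ∨ x = 'b' ∨ x = 'c') :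
    ∀ (m st e : Nat) (cnt : PySem.Dict Char Int) (res : Int), xs.length - st = m →
      st ≤ xs.length → e ≤ xs.length → pvValid xs k st e →
      pvCntIs cnt (pvPre xs st 'a' + pvSuf xs e 'a') (pvPre xs st 'b' + pvSuf xs e 'b')
        (pvPre xs st 'c' + pvSuf xs e 'c') →
      pvAOuter xs k cnt st e res =
        List.foldl min res ((List.range' st (xs.length - st)).map (pvG xs k)) := by
  intro m
  induction m with
  | zero =>
    intro st e cnt res hm hst he hv hcnt
    rw [pvAOuter, dif_neg (by omega), show xs.length - st = 0 from by omega]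
    rfl
  | succ m ih =>
    intro st e cnt res hm hst he hv hcnt
    have hlt : st < xs.length := by omega
    rw [pvAOuter, dif_pos hlt]
    obtain ⟨hp2, hp1⟩ := pv_inner_spec xs k st ht habc (xs.length - e) e cnt rfl he hv hcnt
    have hmle := pv_maxE_le xs k st
    have hvm := pv_valid_maxE xs k ht st
    have hxst : xs[st] = 'a' ∨ xs[st] = 'b' ∨ xs[st] = 'c' := habc _ (List.getElem_mem hlt)
    have hcnt1 := pv_cnt_inc_pre xs st hlt hxst _ (pvMaxE xs k st) hp1
    have hv1 : pvValid xs k (st+1) (pvMaxE xs k st) :=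
      pv_valid_mono_l xs k (pvMaxE xs k st) (Nat.le_succ st) hvm
    have hres : min res ((xs.length : Int) - ((pvMaxE xs k st : Nat) : Int) + (st : Int))
        = min res (pvG xs k st) := by
      unfold pvG
      congr 1
      omega
    dsimp only
    rw [hp2, hres]
    rw [ih (st+1) (pvMaxE xs k st) _ (min res (pvG xs k st)) (by omega) (by omega) hmle hv1 hcnt1]
    rw [show xs.length - st = (xs.length - (st+1)) + 1 from by omega, List.range'_succ,
      List.map_cons, List.foldl_cons]

-- ---- B's take-from-the-right loop reaches the same pvMaxE ----

theorem pv_bgo_spec (xs : List Char) (k : Int) (l : Nat)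
    (ht : k ≤ (xs.count 'a' : Int) ∧ k ≤ (xs.count 'b' : Int) ∧ k ≤ (xs.count 'c' : Int))
    (habc : ∀ x ∈ xs, x = 'a' ∨ x = 'b' ∨ x = 'c') :
    ∀ (m e : Nat) (tk : PySem.Dict Char Int), l ≤ e → e ≤ xs.length → e - l = m →
      pvMaxE xs k l ≤ e →
      pvCntIs tk (pvPre xs l 'a' + pvSuf xs e 'a') (pvPre xs l 'b' + pvSuf xs e 'b')
        (pvPre xs l 'c' + pvSuf xs e 'c') →
      pvBGo k tk ((xs.length - e : Nat) : Int) (((xs.drop l).take (e - l)).reverse)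
        = ((xs.length - pvMaxE xs k l : Nat) : Int) := by
  intro m
  induction m with
  | zero =>
    intro e tk hle hen hm hmax hcnt
    have hel : e = l := by omega
    subst hel
    have hml : pvMaxE xs k e = e :=
      le_antisymm hmax (pv_le_maxE xs k e hen (pv_valid_self xs k ht e))
    rw [hml, Nat.sub_self, List.take_zero, List.reverse_nil]
    rfl
  | succ m ih =>
    intro e tk hle hen hm hmax hcnt
    have hgt : l < e := by omega
    have he1 : e - 1 < xs.length := by omega
    have hidx : e - 1 - l < (xs.drop l).length := by rw [List.length_drop]; omega
    have hel : (xs.drop l)[e - 1 - l]'hidx = xs[e-1] := by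
      rw [List.getElem_drop]
      congr 1
      omega
    have hrest : ((xs.drop l).take (e - l)).reverse
        = xs[e-1] :: ((xs.drop l).take (e - 1 - l)).reverse := by
      rw [show e - l = (e - 1 - l) + 1 from by omega, List.take_succ_eq_append_getElem hidx,
        List.reverse_append, hel]
      rfl
    rw [hrest, pvBGo]
    obtain ⟨h1, h2, h3⟩ := hcnt
    by_cases hval : pvValid xs k l e
    · rw [if_pos (by rw [h1, h2, h3]; exact hval)]
      have hme : pvMaxE xs k l = e := le_antisymm hmax (pv_le_maxE xs k l hen hval)
      rw [hme]
    · rw [if_neg (by rw [h1, h2, h3]; exact hval)]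
      have hmax1 : pvMaxE xs k l ≤ e - 1 := by
        have := pv_maxE_lt xs k l ht hval
        omega
      have hxe : xs[e-1] = 'a' ∨ xs[e-1] = 'b' ∨ xs[e-1] = 'c' :=
        habc _ (List.getElem_mem he1)
      have hcnt1 := pv_cnt_inc_suf xs l e he1 (by omega) hxe tk ⟨h1, h2, h3⟩
      have harith : ((xs.length - e : Nat) : Int) + 1 = ((xs.length - (e-1) : Nat) : Int) := by
        omega
      rw [harith]
      exact ih (e-1) _ (by omega) (by omega) (by omega) hmax1 hcnt1

-- ---- B's helper equals the per-prefix cost ----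

theorem pv_need_eq (xs : List Char) (k : Int)
    (ht : k ≤ (xs.count 'a' : Int) ∧ k ≤ (xs.count 'b' : Int) ∧ k ≤ (xs.count 'c' : Int))
    (habc : ∀ x ∈ xs, x = 'a' ∨ x = 'b' ∨ x = 'c') (l : Nat) (hl : l ≤ xs.length) :
    pvNeed xs k l = pvG xs k l := by
  unfold pvNeed
  have htk := pv_count_fold (xs.take l) pvDict0 0 0 0
    (fun x hx => habc x (List.mem_of_mem_take hx)) pv_cntIs_d0
  have hz : ∀ c, pvSuf xs xs.length c = 0 := by intro c; unfold pvSuf; simp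
  have htk' : pvCntIs ((xs.take l).foldl (fun d c => d.modify c 0 (· + 1)) pvDict0)
      (pvPre xs l 'a' + pvSuf xs xs.length 'a') (pvPre xs l 'b' + pvSuf xs xs.length 'b')
      (pvPre xs l 'c' + pvSuf xs xs.length 'c') := by
    obtain ⟨u1, u2, u3⟩ := htk
    refine ⟨?_, ?_, ?_⟩ <;> rw [hz] <;> unfold pvPre
    · rw [u1]; ring
    · rw [u2]; ring
    · rw [u3]; ring
  have hdrop : (xs.drop l).reverse = ((xs.drop l).take (xs.length - l)).reverse := by
    rw [List.take_of_length_le (by rw [List.length_drop])]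
  have hspec := pv_bgo_spec xs k l ht habc (xs.length - l) xs.length _ hl le_rfl rfl
    (pv_maxE_le xs k l) htk'
  rw [Nat.sub_self, Nat.cast_zero] at hspec
  dsimp only
  rw [hdrop, hspec]
  rfl

-- ---- Python's min over a nonempty list as a fold ----

theorem pv_foldl_min_pull (t : List Int) : ∀ (a x : Int),
    List.foldl min (min a x) t = min a (List.foldl min x t) := by
  induction t with
  | nil => intro a x; rfl
  | cons y t ih => intro a x; rw [List.foldl_cons, List.foldl_cons, min_assoc, ih]

theorem pv_minfold (L : List Int) (a : Int) :
    (match PySem.List.min? (L ++ [a]) (fun v => v) with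
     | some v => v
     | none => 0) = List.foldl min a L := by
  cases L with
  | nil => rw [List.nil_append, PySem.List.min?_id_cons]
  | cons x t =>
    rw [List.cons_append, PySem.List.min?_id_cons]
    show List.foldl min x (t ++ [a]) = List.foldl min a (x :: t)
    rw [List.foldl_append, List.foldl_cons]
    show min (List.foldl min x t) a = List.foldl min (min a x) t
    rw [pv_foldl_min_pull, min_comm]


-- ===== VERDICT (by name: the statement is the Claim_ definition above) =====
theorem takeCharacters_spec : Claim_equal_takeCharacters := by
  intro s k _ hpre
  unfold Spec_takeCharacters takeCharacters takeCharacters_alt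
  have habc : ∀ x ∈ s.toList, x = 'a' ∨ x = 'b' ∨ x = 'c' := by
    intro x hx
    have h := List.all_eq_true.mp hpre x hx
    simpa [Bool.or_eq_true, beq_iff_eq, or_assoc] using h
  have hcnt : pvCntIs (pvCount s.toList) ((s.toList.count 'a' : Int))
      ((s.toList.count 'b' : Int)) ((s.toList.count 'c' : Int)) := by
    have := pv_count_fold s.toList pvDict0 0 0 0 habc pv_cntIs_d0
    unfold pvCount
    simpa using this
  obtain ⟨ha, hb, hc⟩ := hcnt
  by_cases hlt : (pvCount s.toList).getD 'a' 0 < k ∨ (pvCount s.toList).getD 'b' 0 < k ∨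
      (pvCount s.toList).getD 'c' 0 < k
  · simp only [hlt, if_pos]
  · simp only [hlt, if_neg, not_false_iff]
    have ht : k ≤ (s.toList.count 'a' : Int) ∧ k ≤ (s.toList.count 'b' : Int) ∧
        k ≤ (s.toList.count 'c' : Int) := by
      rw [ha, hb, hc] at hlt
      omega
    have hA := pv_outer_spec s.toList k ht habc s.toList.length 0 0 (pvCount s.toList)
      (s.toList.length : Int) (by omega) (Nat.zero_le _) (Nat.zero_le _)
      (pv_valid_self s.toList k ht 0)
      (by refine ⟨?_, ?_, ?_⟩ <;> simp [pvPre, pvSuf, ha, hb, hc])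
    have hmn : pvMaxE s.toList k s.toList.length = s.toList.length :=
      le_antisymm (pv_maxE_le _ _ _) (pv_le_maxE _ _ _ le_rfl (pv_valid_self _ _ ht _))
    have hmap : (List.range (s.toList.length + 1)).map (pvNeed s.toList k)
        = ((List.range s.toList.length).map (pvG s.toList k)) ++ [(s.toList.length : Int)] := by
      rw [List.range_succ, List.map_append, List.map_singleton]
      congr 1
      · exact List.map_congr_left
          (fun l hl => pv_need_eq s.toList k ht habc l (le_of_lt (List.mem_range.mp hl)))
      · have hne : pvNeed s.toList k s.toList.length = (s.toList.length : Int) := by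
          rw [pv_need_eq s.toList k ht habc _ le_rfl]
          unfold pvG
          rw [hmn, Nat.sub_self, Nat.cast_zero, add_zero]
        rw [hne]
    rw [hA, hmap, pv_minfold, List.range_eq_range', Nat.sub_zero]
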